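-- pv_equiv track=rewrite | github.com/martimmpr/poker_hand_no_gui | poker_hand_no_gui.py | check_trio
-- ===== SOURCE A (Python) =====
-- def check_trio(cards):
--     counter = {}
--     trio = False
--
--     for card in cards:
--         card_number = card[:-1]
--         try:
--             if counter[card_number]:
--                 counter[card_number] += 1
--             else:
--                 counter[card_number] = 1
--         except KeyError:
--             counter[card_number] = 1
--
--     for number in counter:
--         if counter[number] == 3:
--             trio = True
--             break
--
--     return trio
-- ===== SOURCE B (Python) =====
-- def check_trio(cards):
--     numbers = sorted(card[:-1] for card in cards)
--     while numbers:
--         head = numbers[0]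
--         run = 1
--         while run < len(numbers) and numbers[run] == head:
--             run += 1
--         if run == 3:
--             return True
--         numbers = numbers[run:]
--     return False
-- ===== Notes on version B (the rewrite author's own statement) =====
-- stated objective: alternative
-- what changed: Replaces A's hash-counter dict (built with try/except) plus a second loop over its keys by sorting the card numbers and scanning the sorted list run by run, checking whether any maximal run of equal values has length exactly 3.
import Mathlib
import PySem

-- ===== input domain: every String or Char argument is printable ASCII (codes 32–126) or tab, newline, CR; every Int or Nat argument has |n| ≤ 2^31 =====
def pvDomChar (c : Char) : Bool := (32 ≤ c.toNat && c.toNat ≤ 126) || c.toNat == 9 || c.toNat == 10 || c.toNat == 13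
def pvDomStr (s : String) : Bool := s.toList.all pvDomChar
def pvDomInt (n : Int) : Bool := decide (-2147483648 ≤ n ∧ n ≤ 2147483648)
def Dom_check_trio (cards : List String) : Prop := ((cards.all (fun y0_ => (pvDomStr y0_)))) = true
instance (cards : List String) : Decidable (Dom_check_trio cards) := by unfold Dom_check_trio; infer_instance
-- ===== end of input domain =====

-- B sorts the card numbers and scans the sorted list run by run, returning whether some run has length 3 (alternative algorithm, not faster).

-- ===== PORT A =====
-- card[:-1]
def pvCardNumber (card : String) : String :=
  String.ofList (PySem.List.slice card.toList none (some (-1)))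

-- the body of A's first loop: try counter[cn] …  except KeyError: counter[cn] = 1
def check_trio_step (counter : PySem.Dict String Int) (card : String) : PySem.Dict String Int :=
  let cn := pvCardNumber card
  match counter.get? cn with
  | some v => if v ≠ 0 then counter.insert cn (v + 1) else counter.insert cn 1
  | none => counter.insert cn 1

-- A's second loop: 'for number in counter: if counter[number] == 3: trio = True; break'
def check_trio_scan (ks : List String) (counter : PySem.Dict String Int) : Bool :=
  match ks with
  | [] => false
  | n :: rest => if counter.getD n 0 == 3 then true else check_trio_scan rest counter

def check_trio (cards : List String) : Bool :=
  let counter := cards.foldl check_trio_step PySem.Dict.empty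
  check_trio_scan counter.keys counter

-- ===== PORT B =====
-- B's outer while loop: consume one maximal run of equal leading numbers per step
def pvRunScan : List String → Bool
  | [] => false
  | x :: rest =>
    if (rest.takeWhile (fun y => y == x)).length + 1 == 3 then true
    else pvRunScan (rest.dropWhile (fun y => y == x))
termination_by xs => xs.length
decreasing_by
  simp only [List.length_cons]
  exact Nat.lt_succ_of_le (List.length_dropWhile_le _ _)

def check_trio_alt (cards : List String) : Bool :=
  pvRunScan (PySem.List.sorted (cards.map pvCardNumber) (fun x => x) false)

-- ===== PRECONDITION & SPEC =====
def Spec_check_trio (cards : List String) (out : Bool) : Prop := out = check_trio_alt cards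
instance (cards : List String) (out : Bool) : Decidable (Spec_check_trio cards out) := by unfold Spec_check_trio; infer_instance

-- ===== CLAIM (what is proved, stated in full; the proofs are below) =====
def Claim_equal_check_trio : Prop := ∀ (cards : List String), Dom_check_trio cards → Spec_check_trio cards (check_trio cards)

-- ===== LEMMAS AND PROOFS =====

-- invariant of A's counter: every stored value is positive (so the truthiness test always increments)
def pvPos (d : PySem.Dict String Int) : Prop := ∀ k v, d.get? k = some v → 0 < v

theorem pvPos_empty : pvPos PySem.Dict.empty := by
  intro k v h; simp [PySem.Dict.get?_empty] at h

theorem pvStep_eq (d : PySem.Dict String Int) (card : String) (hd : pvPos d) :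
    check_trio_step d card
      = d.insert (pvCardNumber card) (d.getD (pvCardNumber card) 0 + 1) := by
  unfold check_trio_step
  cases h : d.get? (pvCardNumber card) with
  | none => simp only [h]; rw [PySem.Dict.getD_eq_get?_getD, h]; simp
  | some v =>
      have hv : 0 < v := hd _ _ h
      simp only [h]
      rw [PySem.Dict.getD_eq_get?_getD, h]
      simp
      intro h0; omega

theorem pvStep_pos (d : PySem.Dict String Int) (card : String) (hd : pvPos d) :
    pvPos (check_trio_step d card) := by
  rw [pvStep_eq d card hd]
  intro k v h
  rw [PySem.Dict.get?_insert] at h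
  split at h
  · cases h
    rw [PySem.Dict.getD_eq_get?_getD]
    cases hg : d.get? (pvCardNumber card) with
    | none => simp
    | some w => have := hd _ _ hg; simp only [Option.getD]; omega
  · exact hd _ _ h

theorem pvFold_eq (cards : List String) :
    ∀ (d : PySem.Dict String Int), pvPos d →
      cards.foldl check_trio_step d
        = (cards.map pvCardNumber).foldl (fun d x => d.insert x (d.getD x 0 + 1)) d := by
  induction cards with
  | nil => intro d _; rfl
  | cons c rest ih =>
      intro d hd
      simp only [List.foldl_cons, List.map_cons]
      rw [pvStep_eq d c hd]
      exact ih _ (by rw [← pvStep_eq d c hd]; exact pvStep_pos d c hd)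

theorem pvScan_eq (ks : List String) (d : PySem.Dict String Int) :
    check_trio_scan ks d = ks.any (fun n => d.getD n 0 == 3) := by
  induction ks with
  | nil => rfl
  | cons n rest ih =>
      simp only [check_trio_scan, List.any_cons]
      split <;> simp_all

-- A's result characterised: some card number occurs exactly three times
theorem pvA_iff (cards : List String) :
    check_trio cards = true ↔
      ∃ n ∈ cards.map pvCardNumber, (cards.map pvCardNumber).count n = 3 := by
  unfold check_trio
  rw [pvFold_eq cards PySem.Dict.empty pvPos_empty,
      PySem.Dict.foldl_insert_getD_add_one_eq_counter, pvScan_eq, PySem.Dict.keys_counter]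
  rw [List.any_eq_true]
  constructor
  · rintro ⟨n, hn, hc⟩
    refine ⟨n, (PySem.Set.mem_ofList _ _).mp hn, ?_⟩
    rw [PySem.Dict.getD_counter] at hc
    simp only [beq_iff_eq] at hc
    exact_mod_cast hc
  · rintro ⟨n, hn, hc⟩
    refine ⟨n, (PySem.Set.mem_ofList _ _).mpr hn, ?_⟩
    rw [PySem.Dict.getD_counter, hc]
    simp

-- in a sorted list, the head does not reappear after its run is dropped
theorem pvNotMem_drop (x : String) :
    ∀ (l : List String), l.Pairwise (· ≤ ·) → (∀ y ∈ l, x ≤ y) →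
      x ∉ l.dropWhile (fun y => y == x) := by
  intro l
  induction l with
  | nil => intro _ _ h; simp at h
  | cons a l ih =>
      intro hp hle
      by_cases hax : a = x
      · subst hax
        simp only [List.dropWhile_cons, BEq.rfl, if_pos]
        exact ih hp.of_cons (fun y hy => hle y (List.mem_cons_of_mem _ hy))
      · rw [List.dropWhile_cons_of_neg (by simpa using hax)]
        intro hmem
        rcases List.mem_cons.mp hmem with h | h
        · exact hax h.symm
        · have h1 : a ≤ x := (List.pairwise_cons.mp hp).1 x h
          have h2 : x ≤ a := hle a List.mem_cons_self
          exact hax (le_antisymm h1 h2)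

-- run scan on a sorted list finds exactly the values of multiplicity 3
theorem pvRunScan_iff :
    ∀ (s : List String), s.Pairwise (· ≤ ·) →
      (pvRunScan s = true ↔ ∃ n ∈ s, s.count n = 3) := by
  intro s
  induction s using pvRunScan.induct with
  | case1 => simp [pvRunScan]
  | case2 x rest hcond =>
      intro hp
      rw [pvRunScan]
      rw [if_pos hcond]
      have hx : (x :: rest).count x = 3 := by
        have hxne : x ∉ rest.dropWhile (fun y => y == x) :=
          pvNotMem_drop x rest hp.of_cons (fun y hy => (List.pairwise_cons.mp hp).1 y hy)
        have hsplit : rest = rest.takeWhile (fun y => y == x) ++ rest.dropWhile (fun y => y == x) :=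
          (List.takeWhile_append_dropWhile).symm
        have htake : (rest.takeWhile (fun y => y == x)).count x
            = (rest.takeWhile (fun y => y == x)).length := by
          rw [List.count_eq_length]
          intro b hb
          have hpb := List.mem_takeWhile_imp (p := fun y => y == x) hb
          exact (beq_iff_eq.mp hpb).symm
        have hdrop : (rest.dropWhile (fun y => y == x)).count x = 0 :=
          List.count_eq_zero.mpr hxne
        have hcond' : (rest.takeWhile (fun y => y == x)).length + 1 = 3 := by
          simpa using hcond
        rw [List.count_cons_self]
        conv_lhs => rw [hsplit]
        rw [List.count_append, htake, hdrop]
        omega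
      simp only [true_iff]
      exact ⟨x, List.mem_cons_self, hx⟩
  | case3 x rest hcond ih =>
      intro hp
      rw [pvRunScan, if_neg hcond]
      set h := rest.takeWhile (fun y => y == x) with hh
      set t := rest.dropWhile (fun y => y == x) with ht
      have hsplit : rest = h ++ t := (List.takeWhile_append_dropWhile).symm
      have hxne : x ∉ t :=
        pvNotMem_drop x rest hp.of_cons (fun y hy => (List.pairwise_cons.mp hp).1 y hy)
      have hmemh : ∀ y ∈ h, y = x := by
        intro y hy
        have := List.mem_takeWhile_imp hy
        simpa using this
      have htp : t.Pairwise (· ≤ ·) :=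
        hp.of_cons.sublist (List.dropWhile_sublist _)
      have hcount : ∀ n, n ≠ x → (x :: rest).count n = t.count n := by
        intro n hnx
        have h0 : (x :: rest).count n = rest.count n := by
          simp only [List.count_cons, beq_iff_eq]
          rw [if_neg (fun he : x = n => hnx he.symm)]
          omega
        rw [h0]
        conv_lhs => rw [hsplit]
        rw [List.count_append]
        have : h.count n = 0 := List.count_eq_zero.mpr (fun hn => hnx (hmemh n hn))
        omega
      have hcx : (x :: rest).count x = h.length + 1 := by
        rw [List.count_cons_self]
        conv_lhs => rw [hsplit]
        rw [List.count_append]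
        have h1 : h.count x = h.length := by
          rw [List.count_eq_length]; intro b hb; exact (hmemh b hb).symm
        have h2 : t.count x = 0 := List.count_eq_zero.mpr hxne
        omega
      rw [ih htp]
      constructor
      · rintro ⟨n, hn, hc⟩
        have hnx : n ≠ x := fun he => hxne (he ▸ hn)
        refine ⟨n, ?_, by rw [hcount n hnx]; exact hc⟩
        exact List.mem_cons_of_mem _ (hsplit ▸ List.mem_append_right h hn)
      · rintro ⟨n, hn, hc⟩
        by_cases hnx : n = x
        · exfalso
          subst hnx
          rw [hcx] at hc
          simp only [beq_iff_eq] at hcond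
          omega
        · refine ⟨n, ?_, by rw [← hcount n hnx]; exact hc⟩
          rcases List.mem_cons.mp hn with h1 | h1
          · exact absurd h1 hnx
          · rcases List.mem_append.mp (hsplit ▸ h1) with h2 | h2
            · exact absurd (hmemh n h2) hnx
            · exact h2

-- ===== VERDICT (by name: the statement is the Claim_ definition above) =====
theorem check_trio_spec : Claim_equal_check_trio := by
  intro cards _
  unfold Spec_check_trio check_trio_alt
  set numbers := cards.map pvCardNumber with hn
  have hperm : (PySem.List.sorted numbers (fun x => x) false).Perm numbers :=
    PySem.List.sorted_perm numbers (fun x => x) false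
  have hpair : (PySem.List.sorted numbers (fun x => x) false).Pairwise (· ≤ ·) := by
    simpa using PySem.List.sorted_pairwise (xs := numbers) (key := fun x => x)
  have hmid : (∃ n ∈ PySem.List.sorted numbers (fun x => x) false,
      (PySem.List.sorted numbers (fun x => x) false).count n = 3)
      ↔ ∃ n ∈ numbers, numbers.count n = 3 := by
    constructor
    · rintro ⟨n, hmem, hc⟩
      exact ⟨n, hperm.mem_iff.mp hmem, by rw [← hperm.count_eq]; exact hc⟩
    · rintro ⟨n, hmem, hc⟩
      exact ⟨n, hperm.mem_iff.mpr hmem, by rw [hperm.count_eq]; exact hc⟩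
  have hfin : check_trio cards = true ↔
      pvRunScan (PySem.List.sorted numbers (fun x => x) false) = true := by
    rw [pvA_iff cards, pvRunScan_iff _ hpair, ← hn]
    exact hmid.symm
  exact Bool.coe_iff_coe.mp hfin
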